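-- pv_equiv track=rewrite | github.com/maku77/hacker-rank | document-classification/main.py | remove_conflicting_entries
-- ===== SOURCE A (Python) =====
-- def remove_conflicting_entries(
--     docs: list[str], labels: list[str]
-- ) -> tuple[list[str], list[str]]:
--     """
--     Remove data with the same content but different labels.
--     """
--     conflicting_indices = set()
--
--     # find duplicated indices
--     for i in range(len(docs)):
--         for j in range(i + 1, len(docs)):
--             if docs[i] == docs[j] and labels[i] != labels[j]:
--                 conflicting_indices.add(i)
--                 conflicting_indices.add(j)
--
--     # remove data with specified indices
--     new_docs = []
--     new_labels = []
--     for i in range(len(docs)):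
--         if i not in conflicting_indices:
--             new_docs.append(docs[i])
--             new_labels.append(labels[i])
--
--     return new_docs, new_labels
-- ===== SOURCE B (Python) =====
-- def remove_conflicting_entries(
--     docs: list[str], labels: list[str]
-- ) -> tuple[list[str], list[str]]:
--     """
--     Remove data with the same content but different labels.
--     O(n): one pass records each doc's first label and marks docs seen
--     with a different label; a second pass keeps only unmarked docs.
--     """
--     first = {}
--     bad = set()
--     for d, l in zip(docs, labels):
--         if d in first:
--             if first[d] != l:
--                 bad.add(d)
--         else:
--             first[d] = l
--     new_docs = []
--     new_labels = []
--     for d, l in zip(docs, labels):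
--         if d not in bad:
--             new_docs.append(d)
--             new_labels.append(l)
--     return new_docs, new_labels
-- ===== Notes on version B (the rewrite author's own statement) =====
-- stated objective: faster
-- what changed: Replaced the O(n^2) all-pairs index comparison with two O(n) passes: a dict records each doc's first label, a set collects docs later seen with a different label, and the filter keeps entries whose doc is not in that set.
import Mathlib
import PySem

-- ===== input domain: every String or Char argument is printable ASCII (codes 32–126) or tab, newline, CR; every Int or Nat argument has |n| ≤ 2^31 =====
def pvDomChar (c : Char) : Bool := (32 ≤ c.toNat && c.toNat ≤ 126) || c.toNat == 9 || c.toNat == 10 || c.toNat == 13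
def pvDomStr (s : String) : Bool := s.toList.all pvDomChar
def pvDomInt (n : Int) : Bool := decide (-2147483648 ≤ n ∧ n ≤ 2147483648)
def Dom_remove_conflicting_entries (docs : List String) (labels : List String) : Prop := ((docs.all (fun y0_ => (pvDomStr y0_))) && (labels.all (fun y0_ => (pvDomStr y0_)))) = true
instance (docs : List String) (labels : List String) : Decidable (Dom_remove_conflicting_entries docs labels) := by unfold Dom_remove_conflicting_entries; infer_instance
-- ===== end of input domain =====

-- B replaces A's O(n^2) all-pairs scan with two linear passes over zipped (doc,label)
-- pairs using a first-label dict and a bad-doc set (objective: faster, asymptotic).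


-- ===== PORT A =====
def remove_conflicting_entries (docs : List String) (labels : List String) : List String × List String :=
  let n : Int := docs.length
  -- find duplicated indices
  let conf : PySem.Set Int :=
    (PySem.List.pyRange 0 n 1).foldl (fun s i =>
      (PySem.List.pyRange (i + 1) n 1).foldl (fun s j =>
        if (PySem.List.pyGetD docs i "" == PySem.List.pyGetD docs j "")
            && !(PySem.List.pyGetD labels i "" == PySem.List.pyGetD labels j "")
        then PySem.Set.add (PySem.Set.add s i) j else s) s)
      PySem.Set.empty
  -- remove data with specified indices
  (PySem.List.pyRange 0 n 1).foldl (fun acc i =>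
    if !(PySem.Set.contains conf i)
    then (acc.1 ++ [PySem.List.pyGetD docs i ""], acc.2 ++ [PySem.List.pyGetD labels i ""])
    else acc) ([], [])

-- ===== PORT B =====
def remove_conflicting_entries_alt (docs : List String) (labels : List String) : List String × List String :=
  let pairs := List.zip docs labels
  let st := pairs.foldl (fun (st : PySem.Dict String String × PySem.Set String) q =>
      match st.1.get? q.1 with
      | some t => if !(t == q.2) then (st.1, PySem.Set.add st.2 q.1) else st
      | none => (st.1.insert q.1 q.2, st.2)) (PySem.Dict.empty, PySem.Set.empty)
  pairs.foldl (fun (acc : List String × List String) q =>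
    if !(PySem.Set.contains st.2 q.1)
    then (acc.1 ++ [q.1], acc.2 ++ [q.2]) else acc) ([], [])

-- ===== PRECONDITION & SPEC =====
-- A indexes labels up to len(docs)-1 and raises IndexError when labels is shorter than docs.
def Pre_remove_conflicting_entries (docs : List String) (labels : List String) : Prop :=
  docs.length ≤ labels.length
instance (docs : List String) (labels : List String) : Decidable (Pre_remove_conflicting_entries docs labels) := by unfold Pre_remove_conflicting_entries; infer_instance

def pvWitness_remove_conflicting_entries : List String × List String :=
  (["a", "b", "a", "a", "c"], ["x", "y", "y", "x", "z"])

def Spec_remove_conflicting_entries (docs : List String) (labels : List String) (out : List String × List String) : Prop := out = remove_conflicting_entries_alt docs labels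
instance (docs : List String) (labels : List String) (out : List String × List String) : Decidable (Spec_remove_conflicting_entries docs labels out) := by unfold Spec_remove_conflicting_entries; infer_instance

-- ===== CLAIM (what is proved, stated in full; the proofs are below) =====
def Claim_equal_remove_conflicting_entries : Prop := ∀ (docs : List String) (labels : List String), Dom_remove_conflicting_entries docs labels → Pre_remove_conflicting_entries docs labels → Spec_remove_conflicting_entries docs labels (remove_conflicting_entries docs labels)

-- ===== LEMMAS AND PROOFS =====

-- ---- generic membership of A's nested set-building folds ----
theorem pv_memInner (c : Int → Int → Bool) (i : Int) :
    ∀ (K : List Int) (s : PySem.Set Int) (x : Int),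
    (x ∈ K.foldl (fun s j => if c i j then PySem.Set.add (PySem.Set.add s i) j else s) s ↔
      x ∈ s ∨ ∃ j ∈ K, c i j = true ∧ (x = i ∨ x = j))
  | [], s, x => by simp
  | j :: K, s, x => by
    simp only [List.foldl_cons]
    rw [pv_memInner]
    by_cases h : c i j = true
    · simp [h, PySem.Set.mem_add, or_assoc]
    · have h' : c i j = false := by simpa using h
      simp [h']

theorem pv_memOuter (c : Int → Int → Bool) (M : Int → List Int) :
    ∀ (L : List Int) (s : PySem.Set Int) (x : Int),
    (x ∈ L.foldl (fun s i => (M i).foldl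
        (fun s j => if c i j then PySem.Set.add (PySem.Set.add s i) j else s) s) s ↔
      x ∈ s ∨ ∃ i ∈ L, ∃ j ∈ M i, c i j = true ∧ (x = i ∨ x = j))
  | [], s, x => by simp
  | i :: L, s, x => by
    simp only [List.foldl_cons]
    rw [pv_memOuter]
    rw [pv_memInner]
    constructor
    · rintro (h | h)
      · rcases h with h | ⟨j, hj, hc, hx⟩
        · exact Or.inl h
        · exact Or.inr ⟨i, by simp, j, hj, hc, hx⟩
      · rcases h with ⟨i', hi', rest⟩
        exact Or.inr ⟨i', by simp [hi'], rest⟩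
    · rintro (h | ⟨i', hi', j, hj, hc, hx⟩)
      · exact Or.inl (Or.inl h)
      · rcases List.mem_cons.mp hi' with rfl | hi'
        · exact Or.inl (Or.inr ⟨j, hj, hc, hx⟩)
        · exact Or.inr ⟨i', hi', j, hj, hc, hx⟩

-- ---- B's first pass: the step function (definitionally the fold body of the port) ----
def pvBStep (st : PySem.Dict String String × PySem.Set String) (q : String × String) :
    PySem.Dict String String × PySem.Set String :=
  match st.1.get? q.1 with
  | some t => if !(t == q.2) then (st.1, PySem.Set.add st.2 q.1) else st
  | none => (st.1.insert q.1 q.2, st.2)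

theorem pv_seen_fold :
    ∀ (l : List (String × String)) (seen : PySem.Dict String String) (bad : PySem.Set String)
      (d : String),
    ((l.foldl pvBStep (seen, bad)).1).get? d =
      ((seen.get? d).orElse (fun _ => (l.find? (fun q => q.1 == d)).map (·.2)))
  | [], seen, bad, d => by simp
  | a :: l, seen, bad, d => by
    simp only [List.foldl_cons]
    cases hseen : seen.get? a.1 with
    | some t =>
      have hstep : pvBStep (seen, bad) a =
          (seen, if t ≠ a.2 then PySem.Set.add bad a.1 else bad) := by
        simp [pvBStep, hseen]; by_cases ht : t = a.2 <;> simp [ht]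
      rw [hstep, pv_seen_fold]
      by_cases hd : a.1 = d
      · subst hd
        simp [hseen]
      · simp [List.find?_cons, hd, beq_iff_eq]
    | none =>
      have hstep : pvBStep (seen, bad) a = (seen.insert a.1 a.2, bad) := by
        simp [pvBStep, hseen]
      rw [hstep, pv_seen_fold]
      by_cases hd : a.1 = d
      · subst hd
        simp [PySem.Dict.get?_insert_self, hseen, List.find?_cons, Option.orElse]
      · rw [PySem.Dict.get?_insert_of_ne seen a.2 (fun h => hd h.symm)]
        simp [List.find?_cons, hd, beq_iff_eq]

theorem pv_bad_fold :
    ∀ (l : List (String × String)) (seen : PySem.Dict String String) (bad : PySem.Set String)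
      (d : String),
    (d ∈ (l.foldl pvBStep (seen, bad)).2 ↔
      d ∈ bad ∨ ∃ q ∈ l, q.1 = d ∧
        some q.2 ≠ ((seen.get? d).orElse (fun _ => (l.find? (fun q => q.1 == d)).map (·.2))))
  | [], seen, bad, d => by simp
  | a :: l, seen, bad, d => by
    simp only [List.foldl_cons]
    by_cases hd : a.1 = d
    · subst hd
      cases hseen : seen.get? a.1 with
      | some t =>
        by_cases ht : t = a.2
        · subst ht
          have hstep : pvBStep (seen, bad) a = (seen, bad) := by simp [pvBStep, hseen]
          rw [hstep, pv_bad_fold]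
          simp only [hseen, Option.orElse_eq_or, Option.some_or]
          constructor
          · rintro (h | ⟨q, hq, h1, h2⟩)
            · exact Or.inl h
            · exact Or.inr ⟨q, List.mem_cons_of_mem _ hq, h1, h2⟩
          · rintro (h | ⟨q, hq, h1, h2⟩)
            · exact Or.inl h
            · rcases List.mem_cons.mp hq with rfl | hq
              · exact (h2 rfl).elim
              · exact Or.inr ⟨q, hq, h1, h2⟩
        · have hstep : pvBStep (seen, bad) a = (seen, PySem.Set.add bad a.1) := by
            simp [pvBStep, hseen, ht]
          rw [hstep, pv_bad_fold]
          simp only [hseen, Option.orElse_eq_or, Option.some_or]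
          constructor
          · intro _
            exact Or.inr ⟨a, List.mem_cons_self, rfl,
              fun h => ht (Option.some.inj h).symm⟩
          · intro _
            exact Or.inl ((PySem.Set.mem_add bad a.1 a.1).mpr (Or.inr rfl))
      | none =>
        have hstep : pvBStep (seen, bad) a = (seen.insert a.1 a.2, bad) := by
          simp [pvBStep, hseen]
        rw [hstep, pv_bad_fold]
        have h1 : (seen.insert a.1 a.2).get? a.1 = some a.2 := by simp
        simp only [h1, hseen, Option.orElse_eq_or, Option.some_or, Option.none_or, List.find?_cons, BEq.rfl,
          cond_true, if_true]
        constructor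
        · rintro (h | ⟨q, hq, h1', h2⟩)
          · exact Or.inl h
          · exact Or.inr ⟨q, List.mem_cons_of_mem _ hq, h1', h2⟩
        · rintro (h | ⟨q, hq, h1', h2⟩)
          · exact Or.inl h
          · rcases List.mem_cons.mp hq with rfl | hq
            · exact (h2 rfl).elim
            · exact Or.inr ⟨q, hq, h1', h2⟩
    · have hfind : (List.find? (fun q => q.1 == d) (a :: l)) = List.find? (fun q => q.1 == d) l := by
        simp [List.find?_cons, hd]
      have hmemiff : ∀ (P : (String × String) → Prop),
          ((∃ q ∈ a :: l, q.1 = d ∧ P q) ↔ (∃ q ∈ l, q.1 = d ∧ P q)) := by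
        intro P
        constructor
        · rintro ⟨q, hq, h1, h2⟩
          rcases List.mem_cons.mp hq with rfl | hq
          · exact absurd h1 hd
          · exact ⟨q, hq, h1, h2⟩
        · rintro ⟨q, hq, h1, h2⟩
          exact ⟨q, List.mem_cons_of_mem _ hq, h1, h2⟩
      cases hseen : seen.get? a.1 with
      | some t =>
        have hstep : pvBStep (seen, bad) a =
            (seen, if t ≠ a.2 then PySem.Set.add bad a.1 else bad) := by
          simp [pvBStep, hseen]; by_cases ht : t = a.2 <;> simp [ht]
        rw [hstep, pv_bad_fold, hfind]
        by_cases ht : t = a.2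
        · rw [if_neg (not_not_intro ht)]
          exact or_congr_right ((hmemiff _).symm)
        · rw [if_pos ht]
          constructor
          · rintro (h | h)
            · rcases (PySem.Set.mem_add bad a.1 d).mp h with h' | h'
              · exact Or.inl h'
              · exact absurd h'.symm hd
            · exact Or.inr ((hmemiff _).mpr h)
          · rintro (h | h)
            · exact Or.inl ((PySem.Set.mem_add bad a.1 d).mpr (Or.inl h))
            · exact Or.inr ((hmemiff _).mp h)
      | none =>
        have hstep : pvBStep (seen, bad) a = (seen.insert a.1 a.2, bad) := by
          simp [pvBStep, hseen]
        rw [hstep, pv_bad_fold, hfind]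
        rw [PySem.Dict.get?_insert_of_ne seen a.2 (fun h => hd h.symm)]
        exact or_congr_right ((hmemiff _).symm)

-- ---- the pairs-level characterisation: "has a partner with the same doc, different label"
--      is the same as "has a partner whose label differs from the FIRST label of that doc" ----
theorem pv_first_conflict (l : List (String × String)) (p : String × String) (hp : p ∈ l) :
    ((∃ q ∈ l, q.1 = p.1 ∧ q.2 ≠ p.2) ↔
      (∃ q ∈ l, q.1 = p.1 ∧ some q.2 ≠ (l.find? (fun r => r.1 == p.1)).map (·.2))) := by
  have hex : ∃ r, l.find? (fun r => r.1 == p.1) = some r := by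
    have : (l.find? (fun r => r.1 == p.1)).isSome := by
      rw [List.find?_isSome]
      exact ⟨p, hp, by simp⟩
    exact Option.isSome_iff_exists.mp this
  rcases hex with ⟨r0, hr0⟩
  have hr0mem : r0 ∈ l := List.mem_of_find?_eq_some hr0
  have hr0key : r0.1 = p.1 := by
    have := List.find?_some hr0
    simpa using this
  rw [hr0]
  simp only [Option.map_some, ne_eq, Option.some.injEq]
  constructor
  · rintro ⟨q, hq, h1, h2⟩
    by_cases hqr : q.2 = r0.2
    · exact ⟨p, hp, rfl, fun h => h2 (hqr.trans h.symm)⟩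
    · exact ⟨q, hq, h1, hqr⟩
  · rintro ⟨q, hq, h1, h2⟩
    by_cases hqp : q.2 = p.2
    · exact ⟨r0, hr0mem, hr0key, fun h => h2 (hqp.trans h.symm)⟩
    · exact ⟨q, hq, h1, hqp⟩

-- ---- range-indexed filter/map collapses to a direct filter/map ----
theorem pv_range_filter_map {α β : Type} (p : α → Bool) (f : α → β) (d : α) :
    ∀ (l : List α),
    ((List.range l.length).filter (fun k => p (l.getD k d))).map (fun k => f (l.getD k d)) =
      (l.filter p).map f
  | [] => by simp
  | x :: t => by
    rw [List.length_cons, List.range_succ_eq_map]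
    have hcomp1 : ((fun k => p ((x :: t).getD k d)) ∘ Nat.succ) = fun k => p (t.getD k d) := by
      funext k; simp
    have hcomp2 : ((fun k => f ((x :: t).getD k d)) ∘ Nat.succ) = fun k => f (t.getD k d) := by
      funext k; simp
    have IH := pv_range_filter_map p f d t
    cases hpx : p x <;>
      · simp [List.filter_cons, hpx, List.filter_map, List.map_map, hcomp1, hcomp2,
              Function.comp_def]
        simpa using IH


-- ---- proof-side names for the two computed sets ----
def pvConf (docs labels : List String) : PySem.Set Int :=
  (PySem.List.pyRange 0 (docs.length : Int) 1).foldl (fun s i =>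
    (PySem.List.pyRange (i + 1) (docs.length : Int) 1).foldl (fun s j =>
      if (PySem.List.pyGetD docs i "" == PySem.List.pyGetD docs j "")
          && !(PySem.List.pyGetD labels i "" == PySem.List.pyGetD labels j "")
      then PySem.Set.add (PySem.Set.add s i) j else s) s)
    PySem.Set.empty

def pvBad (docs labels : List String) : PySem.Set String :=
  ((List.zip docs labels).foldl pvBStep (PySem.Dict.empty, PySem.Set.empty)).2

theorem pv_A_eq (docs labels : List String) :
    remove_conflicting_entries docs labels =
      (((PySem.List.pyRange 0 (docs.length : Int) 1).filter
          (fun i => !(PySem.Set.contains (pvConf docs labels) i))).map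
            (fun i => PySem.List.pyGetD docs i ""),
       ((PySem.List.pyRange 0 (docs.length : Int) 1).filter
          (fun i => !(PySem.Set.contains (pvConf docs labels) i))).map
            (fun i => PySem.List.pyGetD labels i "")) := by
  show (PySem.List.pyRange 0 (docs.length : Int) 1).foldl (fun acc i =>
      if !(PySem.Set.contains (pvConf docs labels) i)
      then (acc.1 ++ [PySem.List.pyGetD docs i ""], acc.2 ++ [PySem.List.pyGetD labels i ""])
      else acc) ([], []) = _
  rw [show (fun (acc : List String × List String) i =>
        if !(PySem.Set.contains (pvConf docs labels) i)
        then (acc.1 ++ [PySem.List.pyGetD docs i ""], acc.2 ++ [PySem.List.pyGetD labels i ""])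
        else acc)
      = (fun (acc : List String × List String) i =>
          ((fun a i => if !(PySem.Set.contains (pvConf docs labels) i)
              then a ++ [PySem.List.pyGetD docs i ""] else a) acc.1 i,
           (fun a i => if !(PySem.Set.contains (pvConf docs labels) i)
              then a ++ [PySem.List.pyGetD labels i ""] else a) acc.2 i))
      from by
        funext acc i
        by_cases h : i ∈ pvConf docs labels <;> simp [h]]
  rw [PySem.List.foldl_prod_mk
    (f := fun a i => if !(PySem.Set.contains (pvConf docs labels) i)
        then a ++ [PySem.List.pyGetD docs i ""] else a)
    (g := fun a i => if !(PySem.Set.contains (pvConf docs labels) i)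
        then a ++ [PySem.List.pyGetD labels i ""] else a)]
  rw [PySem.List.foldl_append_if, PySem.List.foldl_append_if]
  simp

theorem pv_B_eq (docs labels : List String) :
    remove_conflicting_entries_alt docs labels =
      (((List.zip docs labels).filter
          (fun q => !(PySem.Set.contains (pvBad docs labels) q.1))).map (fun q => q.1),
       ((List.zip docs labels).filter
          (fun q => !(PySem.Set.contains (pvBad docs labels) q.1))).map (fun q => q.2)) := by
  show (List.zip docs labels).foldl (fun (acc : List String × List String) q =>
      if !(PySem.Set.contains (pvBad docs labels) q.1)
      then (acc.1 ++ [q.1], acc.2 ++ [q.2]) else acc) ([], []) = _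
  rw [show (fun (acc : List String × List String) (q : String × String) =>
        if !(PySem.Set.contains (pvBad docs labels) q.1)
        then (acc.1 ++ [q.1], acc.2 ++ [q.2]) else acc)
      = (fun (acc : List String × List String) (q : String × String) =>
          ((fun a (q : String × String) =>
              if !(PySem.Set.contains (pvBad docs labels) q.1) then a ++ [q.1] else a) acc.1 q,
           (fun a (q : String × String) =>
              if !(PySem.Set.contains (pvBad docs labels) q.1) then a ++ [q.2] else a) acc.2 q))
      from by
        funext acc q
        by_cases h : q.1 ∈ pvBad docs labels <;> simp [h]]
  rw [PySem.List.foldl_prod_mk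
    (f := fun a (q : String × String) =>
        if !(PySem.Set.contains (pvBad docs labels) q.1) then a ++ [q.1] else a)
    (g := fun a (q : String × String) =>
        if !(PySem.Set.contains (pvBad docs labels) q.1) then a ++ [q.2] else a)]
  rw [PySem.List.foldl_append_if, PySem.List.foldl_append_if]
  simp

theorem pv_getD_zip (docs labels : List String) (hpre : docs.length ≤ labels.length)
    (m : Nat) (hm : m < docs.length) :
    (List.zip docs labels).getD m ("", "") = (docs.getD m "", labels.getD m "") := by
  have hml : m < labels.length := lt_of_lt_of_le hm hpre
  have hmz : m < (List.zip docs labels).length := by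
    rw [List.length_zip]; omega
  rw [List.getD_eq_getElem _ _ hmz, List.getElem_zip,
      List.getD_eq_getElem _ _ hm, List.getD_eq_getElem _ _ hml]

-- the heart: index k is conflicting in A iff its doc is marked bad in B
theorem pv_keep (docs labels : List String) (hpre : docs.length ≤ labels.length)
    (k : Nat) (hk : k < docs.length) :
    PySem.Set.contains (pvConf docs labels) (k : Int) =
      PySem.Set.contains (pvBad docs labels) (((List.zip docs labels).getD k ("", "")).1) := by
  have hlen : (List.zip docs labels).length = docs.length := by
    rw [List.length_zip]; omega
  have hget := pv_getD_zip docs labels hpre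
  have hkz : k < (List.zip docs labels).length := by omega
  have hpk_mem : (List.zip docs labels).getD k ("", "") ∈ List.zip docs labels := by
    rw [List.getD_eq_getElem _ _ hkz]
    exact List.getElem_mem hkz
  rw [Bool.eq_iff_iff, PySem.Set.contains_iff, PySem.Set.contains_iff]
  unfold pvConf pvBad
  rw [pv_memOuter, pv_bad_fold]
  simp only [PySem.Set.empty, List.not_mem_nil, false_or, PySem.Dict.get?_empty, Option.orElse_eq_or,
    Option.none_or]
  rw [← pv_first_conflict (List.zip docs labels) _ hpk_mem]
  constructor
  · rintro ⟨i, hi, j, hj, hc, hx⟩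
    rw [PySem.List.mem_pyRange_one] at hi hj
    obtain ⟨u, rfl⟩ : ∃ u : Nat, i = (u : Int) := ⟨i.toNat, (Int.toNat_of_nonneg hi.1).symm⟩
    obtain ⟨v, rfl⟩ : ∃ v : Nat, j = (v : Int) := ⟨j.toNat, (Int.toNat_of_nonneg (by omega)).symm⟩
    have hu : u < docs.length := by exact_mod_cast hi.2
    have hv : v < docs.length := by exact_mod_cast hj.2
    simp only [PySem.List.pyGetD_natCast, Bool.and_eq_true, beq_iff_eq, Bool.not_eq_true',
      beq_eq_false_iff_ne, ne_eq] at hc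
    rcases hx with h | h
    · obtain rfl : k = u := by exact_mod_cast h
      refine ⟨(docs.zip labels).getD v ("", ""), ?_, ?_, ?_⟩
      · rw [List.getD_eq_getElem _ _ (show v < (docs.zip labels).length by omega)]
        exact List.getElem_mem _
      · rw [hget v hv, hget k hk]
        exact hc.1.symm
      · rw [hget v hv, hget k hk]
        exact fun hh => hc.2 hh.symm
    · obtain rfl : k = v := by exact_mod_cast h
      refine ⟨(docs.zip labels).getD u ("", ""), ?_, ?_, ?_⟩
      · rw [List.getD_eq_getElem _ _ (show u < (docs.zip labels).length by omega)]
        exact List.getElem_mem _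
      · rw [hget u hu, hget k hk]
        exact hc.1
      · rw [hget u hu, hget k hk]
        exact hc.2
  · rintro ⟨q, hq, h1, h2⟩
    obtain ⟨m, hm, rfl⟩ := List.mem_iff_getElem.mp hq
    have hmlen : m < docs.length := by omega
    have hqe : (docs.zip labels)[m] = (docs.getD m "", labels.getD m "") := by
      rw [← List.getD_eq_getElem _ ("", "") hm]
      exact hget m hmlen
    rw [hqe, hget k hk] at h1 h2
    simp only at h1 h2
    have hmk : m ≠ k := fun he => h2 (he ▸ rfl)
    rcases lt_or_gt_of_ne hmk with hlt | hgt
    · refine ⟨(m : Int), ?_, (k : Int), ?_, ?_, Or.inr rfl⟩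
      · rw [PySem.List.mem_pyRange_one]; constructor <;> [omega; exact_mod_cast hmlen]
      · rw [PySem.List.mem_pyRange_one]; constructor <;> [omega; exact_mod_cast hk]
      · simp only [PySem.List.pyGetD_natCast, Bool.and_eq_true, beq_iff_eq, Bool.not_eq_true',
          beq_eq_false_iff_ne, ne_eq]
        exact ⟨h1, h2⟩
    · refine ⟨(k : Int), ?_, (m : Int), ?_, ?_, Or.inl rfl⟩
      · rw [PySem.List.mem_pyRange_one]; constructor <;> [omega; exact_mod_cast hk]
      · rw [PySem.List.mem_pyRange_one]; constructor <;> [omega; exact_mod_cast hmlen]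
      · simp only [PySem.List.pyGetD_natCast, Bool.and_eq_true, beq_iff_eq, Bool.not_eq_true',
          beq_eq_false_iff_ne, ne_eq]
        exact ⟨h1.symm, fun hh => h2 hh.symm⟩

-- assembling a range-indexed filter/map against the pair-list filter/map
theorem pv_assemble {γ : Type} (docs labels : List String) (hpre : docs.length ≤ labels.length)
    (pA : Int → Bool) (pB : String × String → Bool)
    (hp : ∀ k : Nat, k < docs.length → pA (k : Int) = pB ((List.zip docs labels).getD k ("", "")))
    (fA : Int → γ) (fB : String × String → γ)
    (hf : ∀ k : Nat, k < docs.length → fA (k : Int) = fB ((List.zip docs labels).getD k ("", ""))) :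
    ((PySem.List.pyRange 0 (docs.length : Int) 1).filter pA).map fA =
      ((List.zip docs labels).filter pB).map fB := by
  have hlen : (List.zip docs labels).length = docs.length := by
    rw [List.length_zip]; omega
  rw [PySem.List.pyRange_zero_nat]
  rw [List.filter_map, List.map_map]
  rw [← pv_range_filter_map pB fB ("", "") (List.zip docs labels), hlen]
  have hfilter : List.filter ((fun i => pA i) ∘ fun k : Nat => (k : Int)) (List.range docs.length)
      = List.filter (fun k => pB ((List.zip docs labels).getD k ("", ""))) (List.range docs.length) := by
    apply List.filter_congr
    intro k hk
    rw [List.mem_range] at hk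
    exact hp k hk
  rw [hfilter]
  apply List.map_congr_left
  intro k hk
  have hk' : k < docs.length := List.mem_range.mp (List.mem_of_mem_filter hk)
  exact hf k hk'

-- ===== VERDICT (by name: the statement is the Claim_ definition above) =====
theorem remove_conflicting_entries_spec : Claim_equal_remove_conflicting_entries := by
  intro docs labels _ hpre
  unfold Pre_remove_conflicting_entries at hpre
  unfold Spec_remove_conflicting_entries
  rw [pv_A_eq, pv_B_eq]
  have hp : ∀ k : Nat, k < docs.length →
      (fun i => !(PySem.Set.contains (pvConf docs labels) i)) (k : Int) =
        (fun q : String × String => !(PySem.Set.contains (pvBad docs labels) q.1))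
          ((List.zip docs labels).getD k ("", "")) := by
    intro k hk
    simp only []
    rw [pv_keep docs labels hpre k hk]
  refine Prod.ext ?_ ?_
  · exact pv_assemble docs labels hpre _ _ hp _ _ (fun k hk => by
      simp only [PySem.List.pyGetD_natCast]
      rw [pv_getD_zip docs labels hpre k hk])
  · exact pv_assemble docs labels hpre _ _ hp _ _ (fun k hk => by
      simp only [PySem.List.pyGetD_natCast]
      rw [pv_getD_zip docs labels hpre k hk])
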